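-- pv_equiv track=rewrite | github.com/adjaunzemis/apl-golf-league-backend | app/utilities/usga_handicap.py | compute_handicap_strokes
-- ===== SOURCE A (Python) =====
-- def compute_handicap_strokes(stroke_index: int, course_handicap: int) -> int:
--     r"""
--     Computes handicap stokes a player recieves on a hole.
--
--     Parameters
--     ----------
--     stroke_index : int
--         hole stroke index
--     course_handicap : int
--         player course handicap
--
--     Returns
--     -------
--     strokes : int
--         handicap strokes received
--
--     References
--     ----------
--     USGA Rule 3.1
--
--     """
--     strokes = 0
--     if stroke_index > 0:
--         while course_handicap > 18:
--             strokes += 1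
--             course_handicap -= 18
--         if stroke_index <= course_handicap:
--             strokes += 1
--     else:
--         if (18 - stroke_index) < abs(course_handicap):
--             strokes -= 1
--     return strokes
-- ===== SOURCE B (Python) =====
-- def compute_handicap_strokes(stroke_index: int, course_handicap: int) -> int:
--     # Closed-form replacement for A's subtract-18 loop.
--     if stroke_index > 0:
--         if course_handicap > 18:
--             n = (course_handicap - 1) // 18
--             remaining = course_handicap - 18 * n
--         else:
--             n = 0
--             remaining = course_handicap
--         return n + (1 if stroke_index <= remaining else 0)
--     return -1 if (18 - stroke_index) < abs(course_handicap) else 0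
-- ===== Notes on version B (the rewrite author's own statement) =====
-- stated objective: simpler
-- what changed: Replaced the while-loop that repeatedly subtracts 18 and counts iterations with a closed-form division ((course_handicap-1)//18) computing the stroke count and remainder directly.
import Mathlib
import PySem

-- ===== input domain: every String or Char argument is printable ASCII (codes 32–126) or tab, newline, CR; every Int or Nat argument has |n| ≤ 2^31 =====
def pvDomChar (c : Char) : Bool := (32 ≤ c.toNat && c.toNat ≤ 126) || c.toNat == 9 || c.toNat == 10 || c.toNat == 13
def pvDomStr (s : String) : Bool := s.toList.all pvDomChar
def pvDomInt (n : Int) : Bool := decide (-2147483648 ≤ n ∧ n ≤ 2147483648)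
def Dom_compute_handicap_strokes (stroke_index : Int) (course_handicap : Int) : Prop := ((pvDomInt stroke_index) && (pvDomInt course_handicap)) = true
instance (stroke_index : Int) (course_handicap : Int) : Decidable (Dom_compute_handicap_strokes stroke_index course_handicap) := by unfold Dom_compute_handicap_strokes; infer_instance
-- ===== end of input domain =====

-- B replaces A's subtract-18 counting loop with a closed-form division; return values proved equal.

-- ===== PORT A =====
-- the while loop: repeatedly strokes += 1; course_handicap -= 18 while course_handicap > 18
def chsLoop (strokes : Int) (course_handicap : Int) : Int × Int :=
  if course_handicap > 18 then chsLoop (strokes + 1) (course_handicap - 18)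
  else (strokes, course_handicap)
termination_by (course_handicap - 18).toNat
decreasing_by omega

def compute_handicap_strokes (stroke_index : Int) (course_handicap : Int) : Int :=
  let strokes : Int := 0
  if stroke_index > 0 then
    let (strokes, course_handicap) := chsLoop strokes course_handicap
    if stroke_index ≤ course_handicap then strokes + 1 else strokes
  else
    if (18 - stroke_index) < |course_handicap| then strokes - 1 else strokes

-- ===== PORT B =====
def compute_handicap_strokes_alt (stroke_index : Int) (course_handicap : Int) : Int :=
  if stroke_index > 0 then
    let nr : Int × Int :=
      if course_handicap > 18 then
        let n := PySem.Int.floordiv (course_handicap - 1) 18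
        (n, course_handicap - 18 * n)
      else (0, course_handicap)
    nr.1 + (if stroke_index ≤ nr.2 then 1 else 0)
  else
    if (18 - stroke_index) < |course_handicap| then -1 else 0

-- ===== PRECONDITION & SPEC =====
def Spec_compute_handicap_strokes (stroke_index : Int) (course_handicap : Int) (out : Int) : Prop := out = compute_handicap_strokes_alt stroke_index course_handicap
instance (stroke_index : Int) (course_handicap : Int) (out : Int) : Decidable (Spec_compute_handicap_strokes stroke_index course_handicap out) := by unfold Spec_compute_handicap_strokes; infer_instance

-- ===== CLAIM (what is proved, stated in full; the proofs are below) =====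
def Claim_equal_compute_handicap_strokes : Prop := ∀ (stroke_index : Int) (course_handicap : Int), Dom_compute_handicap_strokes stroke_index course_handicap → Spec_compute_handicap_strokes stroke_index course_handicap (compute_handicap_strokes stroke_index course_handicap)

-- ===== LEMMAS AND PROOFS =====

lemma chsLoop_le (s ch : Int) (h : ¬ ch > 18) : chsLoop s ch = (s, ch) := by
  rw [chsLoop]; simp [h]

lemma chsLoop_aux (m : Nat) : ∀ s ch : Int, ch > 18 → (ch - 18).toNat ≤ m →
    chsLoop s ch = (s + PySem.Int.floordiv (ch - 1) 18,
                    ch - 18 * PySem.Int.floordiv (ch - 1) 18) := by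
  induction m with
  | zero => intro s ch h hm; omega
  | succ k ih =>
    intro s ch h hm
    have hb : PySem.Int.floordiv (ch - 1) 18 * 18 ≤ ch - 1 ∧
        ch - 1 < (PySem.Int.floordiv (ch - 1) 18 + 1) * 18 :=
      (PySem.Int.floordiv_eq_iff_of_pos (by norm_num)).mp rfl
    rw [chsLoop]
    simp only [h, if_true]
    by_cases h2 : ch - 18 > 18
    · have hb2 : PySem.Int.floordiv (ch - 18 - 1) 18 * 18 ≤ ch - 18 - 1 ∧
          ch - 18 - 1 < (PySem.Int.floordiv (ch - 18 - 1) 18 + 1) * 18 :=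
        (PySem.Int.floordiv_eq_iff_of_pos (by norm_num)).mp rfl
      rw [ih (s + 1) (ch - 18) h2 (by omega)]
      have heq : PySem.Int.floordiv (ch - 1) 18 = PySem.Int.floordiv (ch - 18 - 1) 18 + 1 := by
        omega
      rw [heq, Prod.mk.injEq]; constructor <;> ring
    · rw [chsLoop_le _ _ h2]
      have heq : PySem.Int.floordiv (ch - 1) 18 = 1 := by omega
      rw [heq, Prod.mk.injEq]; omega

lemma chsLoop_closed (s ch : Int) (h : ch > 18) :
    chsLoop s ch = (s + PySem.Int.floordiv (ch - 1) 18,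
                    ch - 18 * PySem.Int.floordiv (ch - 1) 18) :=
  chsLoop_aux (ch - 18).toNat s ch h le_rfl

-- ===== VERDICT (by name: the statement is the Claim_ definition above) =====
theorem compute_handicap_strokes_spec : Claim_equal_compute_handicap_strokes := by
  intro si ch _
  unfold Spec_compute_handicap_strokes compute_handicap_strokes compute_handicap_strokes_alt
  by_cases hp : si > 0
  · simp only [hp, if_true]
    by_cases h : ch > 18
    · rw [chsLoop_closed 0 ch h]
      simp only [h, if_true, zero_add]
      split_ifs <;> ring
    · rw [chsLoop_le 0 ch h]
      simp only [h, if_false]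
      split_ifs <;> ring
  · simp [hp]
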